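-- pv_equiv track=rewrite | github.com/Hfreitas/sd-03-live-lectures | PYTHON/n_rainhas.py | verifica_diagonal_superior_esquerda
-- ===== SOURCE A (Python) =====
-- def verifica_diagonal_superior_esquerda(atacante, vitima):
--     proxima_posicao = {
--         "linha": atacante["linha"] - 1,
--         "coluna": atacante["coluna"] - 1,
--     }
--     while esta_dentro_do_tabuleiro(
--         proxima_posicao["linha"], proxima_posicao["coluna"]
--     ):
--         if (
--             proxima_posicao["linha"] == vitima["linha"]
--             and proxima_posicao["coluna"] == vitima["coluna"]
--         ):
--             return True
--         proxima_posicao["linha"] -= 1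
--         proxima_posicao["coluna"] -= 1
--     return False
--
-- def esta_dentro_do_tabuleiro(linha, coluna):
--     return 0 <= linha <= 7 and 0 <= coluna <= 7
-- ===== SOURCE B (Python) =====
-- def esta_dentro_do_tabuleiro(linha, coluna):
--     return 0 <= linha <= 7 and 0 <= coluna <= 7
--
--
-- def verifica_diagonal_superior_esquerda(atacante, vitima):
--     linha = atacante["linha"] - 1
--     coluna = atacante["coluna"] - 1
--     if not esta_dentro_do_tabuleiro(linha, coluna):
--         return False
--     passos = linha - vitima["linha"]
--     return 0 <= passos <= min(linha, coluna) and vitima["coluna"] == coluna - passos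
-- ===== Notes on version B (the rewrite author's own statement) =====
-- stated objective: simpler
-- what changed: Replaced the cell-by-cell while loop stepping up-left over board cells with a closed-form arithmetic test: compute the step count from the row difference, check it lies in the visited range, and compare the column.
import Mathlib
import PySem

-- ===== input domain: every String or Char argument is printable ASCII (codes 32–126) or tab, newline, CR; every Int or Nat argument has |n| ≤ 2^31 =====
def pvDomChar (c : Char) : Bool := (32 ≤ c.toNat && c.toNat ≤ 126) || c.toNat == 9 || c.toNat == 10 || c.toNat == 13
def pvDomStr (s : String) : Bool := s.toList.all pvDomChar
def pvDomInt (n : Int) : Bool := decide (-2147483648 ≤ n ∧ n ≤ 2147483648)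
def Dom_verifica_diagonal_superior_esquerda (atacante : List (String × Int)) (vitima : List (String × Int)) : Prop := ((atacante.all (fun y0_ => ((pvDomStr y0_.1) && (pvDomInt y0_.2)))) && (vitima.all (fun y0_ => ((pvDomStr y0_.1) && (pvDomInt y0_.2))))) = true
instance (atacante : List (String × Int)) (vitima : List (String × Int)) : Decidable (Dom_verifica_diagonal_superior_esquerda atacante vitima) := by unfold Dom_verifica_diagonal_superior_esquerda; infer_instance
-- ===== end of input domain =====

-- B replaces A's cell-by-cell while loop with a closed-form arithmetic test (steps = row
-- difference, range check, column match); objective: simpler.  No argument is mutated.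

-- ===== PORT A =====
-- dict lookup atacante["k"] / vitima["k"] is List.lookup (first match on the association-list
-- encoding of a Python dict; a missing key = Python KeyError, excluded by Pre_ below)
-- the while loop of A: current probe cell (l, c), stepping up-left while inside the board
def pvLoopA (vitima : List (String × Int)) (l c : Int) : Bool :=
  if h : 0 ≤ l ∧ l ≤ 7 ∧ 0 ≤ c ∧ c ≤ 7 then
    if (some l == List.lookup "linha" vitima) && (some c == List.lookup "coluna" vitima) then true
    else pvLoopA vitima (l - 1) (c - 1)
  else false
termination_by (l + 1).toNat
decreasing_by omega

def verifica_diagonal_superior_esquerda (atacante : List (String × Int)) (vitima : List (String × Int)) : Bool :=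
  match List.lookup "linha" atacante, List.lookup "coluna" atacante with
  | some al, some ac => pvLoopA vitima (al - 1) (ac - 1)
  | _, _ => false

-- ===== PORT B =====
def esta_dentro_do_tabuleiro (linha coluna : Int) : Bool :=
  decide (0 ≤ linha ∧ linha ≤ 7 ∧ 0 ≤ coluna ∧ coluna ≤ 7)

def verifica_diagonal_superior_esquerda_alt (atacante : List (String × Int)) (vitima : List (String × Int)) : Bool :=
  match List.lookup "linha" atacante with
  | none => false
  | some al =>
   match List.lookup "coluna" atacante with
   | none => false
   | some ac =>
    let linha := al - 1
    let coluna := ac - 1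
    if !esta_dentro_do_tabuleiro linha coluna then false
    else
      match List.lookup "linha" vitima with
      | some vl =>
        let passos := linha - vl
        if 0 ≤ passos ∧ passos ≤ min linha coluna then
          match List.lookup "coluna" vitima with
          | some vc => decide (vc = coluna - passos)
          | none => false
        else false
      | none => false

-- ===== PRECONDITION & SPEC =====
-- Pre_ excludes exactly the inputs on which the Python A raises KeyError: a dict key is read
-- and missing — atacante needs both keys; vitima["linha"] is read only when the attacker's
-- first up-left step is on the board, and vitima["coluna"] only when some visited row equals
-- vitima["linha"] (the step count lies in the visited range).  B raises on the same inputs.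
def Pre_verifica_diagonal_superior_esquerda (atacante : List (String × Int)) (vitima : List (String × Int)) : Prop :=
  (List.lookup "linha" atacante).isSome = true ∧ (List.lookup "coluna" atacante).isSome = true ∧
  (let l := (List.lookup "linha" atacante).getD 0 - 1
   let c := (List.lookup "coluna" atacante).getD 0 - 1
   (0 ≤ l ∧ l ≤ 7 ∧ 0 ≤ c ∧ c ≤ 7) →
     (List.lookup "linha" vitima).isSome = true ∧
     (let vl := (List.lookup "linha" vitima).getD 0
      (0 ≤ l - vl ∧ l - vl ≤ min l c) → (List.lookup "coluna" vitima).isSome = true))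
instance (atacante : List (String × Int)) (vitima : List (String × Int)) : Decidable (Pre_verifica_diagonal_superior_esquerda atacante vitima) := by unfold Pre_verifica_diagonal_superior_esquerda; infer_instance

def pvWitness_verifica_diagonal_superior_esquerda : (List (String × Int)) × (List (String × Int)) :=
  ([("linha", 3), ("coluna", 3)], [("linha", 1), ("coluna", 1)])

def Spec_verifica_diagonal_superior_esquerda (atacante : List (String × Int)) (vitima : List (String × Int)) (out : Bool) : Prop := out = verifica_diagonal_superior_esquerda_alt atacante vitima
instance (atacante : List (String × Int)) (vitima : List (String × Int)) (out : Bool) : Decidable (Spec_verifica_diagonal_superior_esquerda atacante vitima out) := by unfold Spec_verifica_diagonal_superior_esquerda; infer_instance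

-- ===== CLAIM (what is proved, stated in full; the proofs are below) =====
def Claim_equal_verifica_diagonal_superior_esquerda : Prop := ∀ (atacante : List (String × Int)) (vitima : List (String × Int)), Dom_verifica_diagonal_superior_esquerda atacante vitima → Pre_verifica_diagonal_superior_esquerda atacante vitima → Spec_verifica_diagonal_superior_esquerda atacante vitima (verifica_diagonal_superior_esquerda atacante vitima)

-- ===== LEMMAS AND PROOFS =====

-- If vitima's "coluna" is missing, the loop never matches and returns false.
lemma pvLoopA_none (vitima : List (String × Int)) (hc : List.lookup "coluna" vitima = none) :
    ∀ l c : Int, pvLoopA vitima l c = false := by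
  intro l c
  fun_induction pvLoopA vitima l c with
  | case1 l c h heq => simp [hc] at heq
  | case2 l c h heq ih => exact ih
  | case3 l c h => rfl

-- Characterisation of A's loop when both victim coordinates are present.
lemma pvLoopA_iff (vitima : List (String × Int)) (vl vc : Int)
    (hl : List.lookup "linha" vitima = some vl) (hc : List.lookup "coluna" vitima = some vc) :
    ∀ l c : Int, pvLoopA vitima l c = true ↔
      (0 ≤ vl ∧ 0 ≤ vc ∧ vl ≤ l ∧ l ≤ 7 ∧ c ≤ 7 ∧ l - vl = c - vc) := by
  intro l c
  fun_induction pvLoopA vitima l c with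
  | case1 l c h heq =>
    rw [hl, hc] at heq
    simp only [Bool.and_eq_true, beq_iff_eq, Option.some.injEq] at heq
    obtain ⟨h1, h2⟩ := heq
    subst h1; subst h2
    simp only [true_iff]
    omega
  | case2 l c h heq ih =>
    rw [hl, hc] at heq
    simp only [Bool.and_eq_true, beq_iff_eq, Option.some.injEq, not_and] at heq
    rw [ih]
    constructor <;> intro hr
    · omega
    · refine ⟨hr.1, hr.2.1, ?_, by omega, by omega, by omega⟩
      rcases eq_or_lt_of_le hr.2.2.1 with he | hlt
      · exfalso; apply heq <;> omega
      · omega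
  | case3 l c h =>
    simp only [Bool.false_eq_true, false_iff]
    omega

lemma main_eq (atacante vitima : List (String × Int))
    (hpre : Pre_verifica_diagonal_superior_esquerda atacante vitima) :
    verifica_diagonal_superior_esquerda atacante vitima
      = verifica_diagonal_superior_esquerda_alt atacante vitima := by
  obtain ⟨ha1, ha2, hrest⟩ := hpre
  obtain ⟨al, hal⟩ := Option.isSome_iff_exists.mp ha1
  obtain ⟨ac, hac⟩ := Option.isSome_iff_exists.mp ha2
  rw [hal, hac] at hrest
  simp only [Option.getD_some] at hrest
  unfold verifica_diagonal_superior_esquerda verifica_diagonal_superior_esquerda_alt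
  rw [hal, hac]
  by_cases hb : (0 ≤ al - 1 ∧ al - 1 ≤ 7 ∧ 0 ≤ ac - 1 ∧ ac - 1 ≤ 7)
  · have hbd : esta_dentro_do_tabuleiro (al - 1) (ac - 1) = true := by
      simp [esta_dentro_do_tabuleiro]; omega
    obtain ⟨hv1, hv2⟩ := hrest hb
    obtain ⟨vl, hvl⟩ := Option.isSome_iff_exists.mp hv1
    rw [hvl] at hv2
    simp only [Option.getD_some] at hv2
    simp only [hbd, Bool.not_true, Bool.false_eq_true, if_false, hvl]
    by_cases hrange : (0 ≤ al - 1 - vl ∧ al - 1 - vl ≤ min (al - 1) (ac - 1))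
    · obtain ⟨vc, hvc⟩ := Option.isSome_iff_exists.mp (hv2 hrange)
      rw [if_pos hrange, hvc, Bool.eq_iff_iff, pvLoopA_iff vitima vl vc hvl hvc]
      simp only [decide_eq_true_iff]
      omega
    · rw [if_neg hrange]
      cases hvcv : List.lookup "coluna" vitima with
      | none => exact pvLoopA_none vitima hvcv _ _
      | some vc =>
        rw [Bool.eq_iff_iff, pvLoopA_iff vitima vl vc hvl hvcv]
        simp only [Bool.false_eq_true, iff_false]
        omega
  · have hbd : esta_dentro_do_tabuleiro (al - 1) (ac - 1) = false := by
      simp [esta_dentro_do_tabuleiro]; omega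
    simp only [hbd, Bool.not_false, if_true]
    rw [pvLoopA.eq_def, dif_neg hb]

-- ===== VERDICT (by name: the statement is the Claim_ definition above) =====
theorem verifica_diagonal_superior_esquerda_spec : Claim_equal_verifica_diagonal_superior_esquerda := by
  intro atacante vitima _ hpre
  exact main_eq atacante vitima hpre
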